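-- pv_equiv track=rewrite | github.com/valple/adventofcode | 2025/d6.py | parse_ops_2
-- ===== SOURCE A (Python) =====
-- def parse_ops_2(ops):
--     curop = '+'
--     cur_start_pos = 0
--     cur_col_len = 0
--     sep_ops = []
--     for i, x in enumerate(ops):
--         if x == ' ':
--             cur_col_len += 1
--         else:
--             if cur_col_len > 0:
--                 sep_ops.append((curop, cur_start_pos, cur_start_pos + cur_col_len - 1))
--             cur_start_pos = i
--             curop = x
--             cur_col_len = 1
--     sep_ops.append((curop, cur_start_pos, cur_start_pos + cur_col_len))
--     return sep_ops
-- ===== SOURCE B (Python) =====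
-- def parse_ops_2(ops):
--     anchors = [(x, i) for i, x in enumerate(ops) if x != ' ']
--     if not ops or ops[0] == ' ':
--         anchors = [('+', 0)] + anchors
--     out = [(op, pos, nxt - 1) for (op, pos), (_, nxt) in zip(anchors, anchors[1:])]
--     op, pos = anchors[-1]
--     out.append((op, pos, len(ops)))
--     return out
-- ===== Notes on version B (the rewrite author's own statement) =====
-- stated objective: alternative
-- what changed: Replaces A's single-pass state machine (running operator/start/column-length accumulators) with a two-phase decomposition: first build the table of non-space anchors (prepending a phantom '+' anchor when the string is empty or starts with a space), then one zip over adjacent anchor pairs emits each segment ending at the next anchor's position minus one, with the last anchor's segment ending at len(ops).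
import Mathlib
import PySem

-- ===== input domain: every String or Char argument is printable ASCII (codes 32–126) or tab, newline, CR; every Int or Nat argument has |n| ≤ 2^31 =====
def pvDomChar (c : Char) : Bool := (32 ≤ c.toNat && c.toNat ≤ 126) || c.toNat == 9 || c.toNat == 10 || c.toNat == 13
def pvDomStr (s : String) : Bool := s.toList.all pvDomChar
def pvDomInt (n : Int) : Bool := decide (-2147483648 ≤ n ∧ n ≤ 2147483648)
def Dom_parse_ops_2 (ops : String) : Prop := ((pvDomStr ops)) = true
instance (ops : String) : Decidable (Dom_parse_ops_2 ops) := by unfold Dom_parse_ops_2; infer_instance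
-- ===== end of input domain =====

-- B replaces A's running state machine by an anchor table plus a pairwise zip pass; objective: alternative decomposition, same cost.

-- ===== PORT A =====
-- the for-loop of A, state = (curop, cur_start_pos, cur_col_len, sep_ops), i the running index
def goA : List Char → Int → String × Int × Int × List (String × Int × Int) → String × Int × Int × List (String × Int × Int)
  | [], _, st => st
  | x :: rest, i, (curop, start, col, sep) =>
    if x = ' ' then goA rest (i + 1) (curop, start, col + 1, sep)
    else goA rest (i + 1)
      (String.ofList [x], i, 1,
        if col > 0 then sep ++ [(curop, start, start + col - 1)] else sep)

def parse_ops_2 (ops : String) : List (String × Int × Int) :=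
  let st := goA ops.toList 0 ("+", 0, 0, [])
  st.2.2.2 ++ [(st.1, st.2.1, st.2.1 + st.2.2.1)]

-- ===== PORT B =====
-- the comprehension: anchors = [(x, i) for i, x in enumerate(ops) if x != ' ']
def anchorsB : List Char → Int → List (String × Int)
  | [], _ => []
  | x :: rest, i =>
    if x ≠ ' ' then (String.ofList [x], i) :: anchorsB rest (i + 1) else anchorsB rest (i + 1)

def parse_ops_2_alt (ops : String) : List (String × Int × Int) :=
  let a0 := anchorsB ops.toList 0
  let anchors := if ops.toList.isEmpty || ops.toList.head? = some ' ' then ("+", (0 : Int)) :: a0 else a0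
  -- out = [(op, pos, nxt - 1) for (op, pos), (_, nxt) in zip(anchors, anchors[1:])]
  let out := (anchors.zip (anchors.drop 1)).map (fun pq => (pq.1.1, pq.1.2, pq.2.2 - 1))
  -- op, pos = anchors[-1]; out.append((op, pos, len(ops)))  (anchors is never empty; none-branch totalises)
  match anchors.getLast? with
  | some lastA => out ++ [(lastA.1, lastA.2, (ops.toList.length : Int))]
  | none => out

-- ===== PRECONDITION & SPEC =====
def Spec_parse_ops_2 (ops : String) (out : List (String × Int × Int)) : Prop := out = parse_ops_2_alt ops
instance (ops : String) (out : List (String × Int × Int)) : Decidable (Spec_parse_ops_2 ops out) := by unfold Spec_parse_ops_2; infer_instance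

-- ===== CLAIM (what is proved, stated in full; the proofs are below) =====
def Claim_equal_parse_ops_2 : Prop := ∀ (ops : String), Dom_parse_ops_2 ops → Spec_parse_ops_2 ops (parse_ops_2 ops)

-- ===== LEMMAS AND PROOFS =====

def finishA (st : String × Int × Int × List (String × Int × Int)) : List (String × Int × Int) :=
  st.2.2.2 ++ [(st.1, st.2.1, st.2.1 + st.2.2.1)]

-- proof-side recursive characterisation of B's zip-plus-last pass
def segmentsB : List (String × Int) → Int → List (String × Int × Int)
  | [], _ => []
  | [(op, pos)], n => [(op, pos, n)]
  | (op, pos) :: nxt :: rest, n => (op, pos, nxt.2 - 1) :: segmentsB (nxt :: rest) n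

-- B's zip-pairing pass followed by the last-anchor append equals segmentsB
lemma zipseg (a : List (String × Int)) : ∀ (p : String × Int) (n : Int),
    (match (p :: a).getLast? with
     | some lastA =>
        (((p :: a).zip ((p :: a).drop 1)).map (fun pq => (pq.1.1, pq.1.2, pq.2.2 - 1)))
          ++ [(lastA.1, lastA.2, n)]
     | none => ((p :: a).zip ((p :: a).drop 1)).map (fun pq => (pq.1.1, pq.1.2, pq.2.2 - 1)))
    = segmentsB (p :: a) n := by
  induction a with
  | nil => intro p n; simp [segmentsB]
  | cons q rest ih =>
    intro p n
    rw [List.getLast?_cons_cons]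
    have h := ih q n
    cases hq : (q :: rest).getLast? with
    | none => simp at hq
    | some lastA =>
      rw [hq] at h
      obtain ⟨op, pos⟩ := p
      obtain ⟨op', pos'⟩ := q
      simp only [List.drop_succ_cons, List.drop_zero, List.zip_cons_cons, List.map_cons,
        List.cons_append, segmentsB] at h ⊢
      rw [h]

-- loop invariant: with 1 ≤ col and start + col = i, finishing A's loop equals sep
-- followed by B's pairwise segments over the current anchor plus the remaining anchors
lemma main_inv (l : List Char) : ∀ (i start col : Int) (curop : String)
    (sep : List (String × Int × Int)), 1 ≤ col → start + col = i →
    finishA (goA l i (curop, start, col, sep)) =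
      sep ++ segmentsB ((curop, start) :: anchorsB l i) (i + (l.length : Int)) := by
  induction l with
  | nil =>
    intro i start col curop sep h1 h2
    simp [goA, finishA, anchorsB, segmentsB]
    omega
  | cons x rest ih =>
    intro i start col curop sep h1 h2
    have e3 : i + ((x :: rest).length : Int) = (i + 1) + (rest.length : Int) := by
      simp only [List.length_cons]; push_cast; omega
    by_cases hx : x = ' '
    · subst hx
      have e1 : goA (' ' :: rest) i (curop, start, col, sep)
          = goA rest (i + 1) (curop, start, col + 1, sep) := by
        simp [goA]
      have e2 : anchorsB (' ' :: rest) i = anchorsB rest (i + 1) := by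
        simp [anchorsB]
      rw [e1, e2, e3, ih (i + 1) start (col + 1) curop sep (by omega) (by omega)]
    · have e1 : goA (x :: rest) i (curop, start, col, sep)
          = goA rest (i + 1) (String.ofList [x], i, 1, sep ++ [(curop, start, start + col - 1)]) := by
        simp only [goA]
        rw [if_neg hx, if_pos (show col > 0 by omega)]
      have e2 : anchorsB (x :: rest) i = (String.ofList [x], i) :: anchorsB rest (i + 1) := by
        simp [anchorsB, hx]
      rw [e1, e2, e3, ih (i + 1) i 1 (String.ofList [x]) _ (by omega) (by omega)]
      have e4 : start + col - 1 = i - 1 := by omega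
      simp [segmentsB, e4]

theorem parse_ops_2_aux (ops : String) : parse_ops_2 ops = parse_ops_2_alt ops := by
  unfold parse_ops_2 parse_ops_2_alt
  cases hl : ops.toList with
  | nil => simp [goA, anchorsB]
  | cons x rest =>
    by_cases hx : x = ' '
    · subst hx
      have e1 : goA (' ' :: rest) 0 ("+", 0, 0, []) = goA rest 1 ("+", 0, 1, []) := by
        simp [goA]
      have e2 : anchorsB (' ' :: rest) 0 = anchorsB rest 1 := by
        simp [anchorsB]
      show finishA (goA (' ' :: rest) 0 ("+", 0, 0, [])) = _
      rw [e1, main_inv rest 1 0 1 "+" [] (by omega) (by omega)]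
      simp only [List.isEmpty_cons, List.head?_cons, List.length_cons, e2]
      rw [if_pos (by simp)]
      rw [zipseg (anchorsB rest 1) ("+", (0 : Int))]
      simp [add_comm]
    · have e1 : goA (x :: rest) 0 ("+", 0, 0, []) = goA rest 1 (String.ofList [x], 0, 1, []) := by
        simp only [goA]
        rw [if_neg hx, if_neg (show ¬ ((0:Int) > 0) by omega)]
        norm_num
      have e2 : anchorsB (x :: rest) 0 = (String.ofList [x], 0) :: anchorsB rest 1 := by
        simp [anchorsB, hx]
      show finishA (goA (x :: rest) 0 ("+", 0, 0, [])) = _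
      rw [e1, main_inv rest 1 0 1 (String.ofList [x]) [] (by omega) (by omega)]
      simp only [List.isEmpty_cons, List.head?_cons, List.length_cons, e2]
      rw [if_neg (by simp [hx])]
      rw [zipseg (anchorsB rest 1) (String.ofList [x], (0 : Int))]
      simp [add_comm]

-- ===== VERDICT (by name: the statement is the Claim_ definition above) =====
theorem parse_ops_2_spec : Claim_equal_parse_ops_2 := by
  intro ops _
  unfold Spec_parse_ops_2
  exact parse_ops_2_aux ops
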